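-- pv_equiv track=rewrite | github.com/dshuhler/codility_lessons | codility/8_leader/equi_leader.py | solution
-- ===== SOURCE A (Python) =====
-- def is_dominator(candidate, list):
--     count = 0
--     for val in list:
--         if val == candidate:
--             count += 1
--     return count > len(list) // 2
--
-- def find_leader(leader_list):
--     leader_stack = []
--
--     for num in leader_list:
--         if leader_stack and num != leader_stack[-1]:
--             leader_stack.pop()
--         else:
--             leader_stack.append(num)
--
--     if leader_stack and is_dominator(leader_stack[0], leader_list):
--         return leader_stack[0]
--     else:
--         return -1
--
-- def solution(A):
--     leader = find_leader(A)
--     if leader == -1: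
--         return 0
--
--     right_leader_count = A.count(leader)
--     left_leader_count = 0
--     array_length = len(A)
--     equi_leader_count = 0
--
--     for i, val in enumerate(A):
--         if val == leader:
--             left_leader_count += 1
--             right_leader_count -= 1
--
--         right_leader = right_leader_count > (array_length - (i + 1)) // 2
--         left_leader = left_leader_count > (i + 1) // 2
--
--         if right_leader and left_leader:
--             equi_leader_count += 1
--
--     return equi_leader_count
-- ===== SOURCE B (Python) =====
-- def solution(A):
--     n = len(A)
--     counts = {}
--     for v in A:
--         counts[v] = counts.get(v, 0) + 1
--     leader = -1
--     for v, c in counts.items():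
--         if c > n // 2:
--             leader = v
--             break
--     if leader == -1:
--         return 0
--     total = counts[leader]
--     left = 0
--     result = 0
--     for i, v in enumerate(A):
--         if v == leader:
--             left += 1
--         if left > (i + 1) // 2 and total - left > (n - i - 1) // 2:
--             result += 1
--     return result
-- ===== Notes on version B (the rewrite author's own statement) =====
-- stated objective: idiomatic
-- what changed: The leader is found by building a frequency dictionary in one pass and scanning it for a count above len(A)//2, instead of A's Boyer-Moore vote/cancel stack followed by a verification recount; the equi-leader pass then tracks only the left count, deriving the right count from the dictionary total.
import Mathlib
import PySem

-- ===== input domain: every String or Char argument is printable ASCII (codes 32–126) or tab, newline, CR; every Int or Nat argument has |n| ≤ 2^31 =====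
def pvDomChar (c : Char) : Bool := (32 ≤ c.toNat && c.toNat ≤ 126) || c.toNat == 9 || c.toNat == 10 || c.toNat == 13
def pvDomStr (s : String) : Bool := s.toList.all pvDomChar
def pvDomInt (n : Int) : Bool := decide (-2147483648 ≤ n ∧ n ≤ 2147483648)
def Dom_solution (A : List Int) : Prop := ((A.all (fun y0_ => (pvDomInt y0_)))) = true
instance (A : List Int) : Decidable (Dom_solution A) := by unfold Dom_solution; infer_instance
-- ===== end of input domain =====

-- B replaces A's Boyer–Moore vote/cancel stack by a frequency dictionary built in one
-- pass and scanned for a majority count (idiomatic counting; return value only).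

-- ===== PORT A =====
def isDominator (candidate : Int) (list : List Int) : Bool :=
  -- explicit counting loop of is_dominator
  let count : Int := list.foldl (fun c val => if val = candidate then c + 1 else c) 0
  decide (count > PySem.Int.floordiv (list.length : Int) 2)

def findLeader (leaderList : List Int) : Int :=
  let stack : List Int := leaderList.foldl (fun stack num =>
    -- 'if leader_stack and num != leader_stack[-1]: pop else: append'
    if stack ≠ [] ∧ stack.getLast? ≠ some num then stack.dropLast else stack ++ [num]) []
  match stack with
  | [] => -1
  | c :: _ => if isDominator c leaderList then c else -1   -- leader_stack[0]

def solution (A : List Int) : Int :=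
  let leader := findLeader A
  if leader = -1 then 0
  else
    let n : Int := (A.length : Int)
    let res := (PySem.List.enumerate A).foldl (fun (s : Int × Int × Int) p =>
      let right := if p.2 = leader then s.1 - 1 else s.1
      let left := if p.2 = leader then s.2.1 + 1 else s.2.1
      let rightLeader := right > PySem.Int.floordiv (n - (p.1 + 1)) 2
      let leftLeader := left > PySem.Int.floordiv (p.1 + 1) 2
      (right, left, if rightLeader ∧ leftLeader then s.2.2 + 1 else s.2.2))
      ((PySem.List.count A leader : Int), 0, 0)
    res.2.2

-- ===== PORT B =====
-- 'for v, c in counts.items(): if c > n // 2: leader = v; break' (with leader = -1 default)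
def findLeaderScan (n : Int) : List (Int × Int) → Int
  | [] => -1
  | (v, c) :: rest => if c > PySem.Int.floordiv n 2 then v else findLeaderScan n rest

def solution_alt (A : List Int) : Int :=
  let n : Int := (A.length : Int)
  let counts := A.foldl (fun d v => d.insert v (d.getD v 0 + 1)) (PySem.Dict.empty : PySem.Dict Int Int)
  let leader := findLeaderScan n counts.items
  if leader = -1 then 0
  else
    let total := counts.getD leader 0
    let res := (PySem.List.enumerate A).foldl (fun (s : Int × Int) p =>
      let left := if p.2 = leader then s.1 + 1 else s.1
      (left, if left > PySem.Int.floordiv (p.1 + 1) 2 ∧ total - left > PySem.Int.floordiv (n - p.1 - 1) 2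
             then s.2 + 1 else s.2))
      ((0 : Int), (0 : Int))
    res.2

-- ===== PRECONDITION & SPEC =====
def Spec_solution (A : List Int) (out : Int) : Prop := out = solution_alt A
instance (A : List Int) (out : Int) : Decidable (Spec_solution A out) := by unfold Spec_solution; infer_instance

-- ===== CLAIM (what is proved, stated in full; the proofs are below) =====
def Claim_equal_solution : Prop := ∀ (A : List Int), Dom_solution A → Spec_solution A (solution A)

-- ===== LEMMAS AND PROOFS =====

-- fdiv bridge
lemma gt_fdiv_iff (len : Nat) (c : Int) : c > PySem.Int.floordiv (len : Int) 2 ↔ 2 * c > (len : Int) := by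
  rw [PySem.Int.floordiv_eq_ediv_of_pos (by norm_num)]
  omega

lemma count_fold (cand : Int) (l : List Int) (a : Int) :
    l.foldl (fun c val => if val = cand then c + 1 else c) a = a + (l.count cand : Int) := by
  induction l generalizing a with
  | nil => simp
  | cons h t ih =>
    by_cases hh : h = cand <;> simp [List.count_cons, hh, ih] <;> push_cast <;> ring

lemma isDominator_eq (c : Int) (l : List Int) :
    isDominator c l = decide (2 * (l.count c : Int) > (l.length : Int)) := by
  unfold isDominator
  rw [count_fold]
  simp only [zero_add, gt_iff_lt, decide_eq_decide]
  rw [PySem.Int.floordiv_eq_ediv_of_pos (by norm_num)]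
  omega

lemma bm_invariant (l : List Int) :
    ∃ (k : Nat) (c : Int),
      l.foldl (fun stack num => if stack ≠ [] ∧ stack.getLast? ≠ some num then stack.dropLast else stack ++ [num]) [] = List.replicate k c ∧
      ∀ x : Int, 2 * (l.count x : Int) ≤ (l.length : Int) - k + 2 * (if x = c then (k : Int) else 0) := by
  induction l using List.reverseRecOn with
  | nil => exact ⟨0, 0, rfl, by simp⟩
  | append_singleton l a ih =>
    obtain ⟨k, c, hs, hinv⟩ := ih
    rw [List.foldl_append, List.foldl_cons, List.foldl_nil, hs]
    by_cases hk : k = 0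
    · subst hk
      refine ⟨1, a, by simp, ?_⟩
      intro x
      have := hinv x
      by_cases hx : x = a <;> by_cases hxc : x = c <;>
        simp [List.count_append, List.count_singleton, hx, hxc] at this ⊢ <;> push_cast at this ⊢ <;> omega
    · obtain ⟨k', rfl⟩ : ∃ k', k = k' + 1 := ⟨k - 1, by omega⟩
      by_cases hca : c = a
      · subst hca
        refine ⟨k' + 2, c, ?_, ?_⟩
        · simp [List.getLast?_replicate, ← List.replicate_succ']
        · intro x
          have := hinv x
          by_cases hx : x = c <;>
            simp [List.count_append, List.count_singleton, hx] at this ⊢ <;> push_cast at this ⊢ <;> omega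
      · refine ⟨k', c, ?_, ?_⟩
        · have h1 : (List.replicate (k' + 1) c).getLast? = some c := by simp [List.getLast?_replicate]
          rw [if_pos ⟨by simp, by simp [h1, hca]⟩]
          rw [List.replicate_succ', List.dropLast_concat]
        · intro x
          have := hinv x
          by_cases hx : x = c <;> by_cases hxa : x = a <;>
            simp [List.count_append, List.count_singleton, hx, hxa] at this ⊢ <;> push_cast at this ⊢ <;> omega
lemma findLeader_of_majority (A : List Int) (m : Int) (h : 2 * (A.count m : Int) > (A.length : Int)) :
    findLeader A = m := by
  obtain ⟨k, c, hs, hinv⟩ := bm_invariant A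
  have hm := hinv m
  have hmc : m = c := by
    by_contra hne
    simp [hne] at hm
    omega
  subst hmc
  have hk : k ≠ 0 := by
    rintro rfl
    simp at hm
    omega
  obtain ⟨k', rfl⟩ : ∃ k', k = k' + 1 := ⟨k - 1, by omega⟩
  unfold findLeader
  rw [hs, List.replicate_succ]
  simp only [isDominator_eq]
  rw [decide_eq_true (by omega : 2 * (A.count m : Int) > (A.length : Int))]
  simp

lemma findLeader_of_no_majority (A : List Int) (h : ∀ x : Int, ¬ 2 * (A.count x : Int) > (A.length : Int)) :
    findLeader A = -1 := by
  unfold findLeader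
  cases hs : A.foldl (fun stack num => if stack ≠ [] ∧ stack.getLast? ≠ some num then stack.dropLast else stack ++ [num]) [] with
  | nil => rfl
  | cons c rest =>
    simp only [isDominator_eq]
    rw [decide_eq_false (h c)]
    simp

lemma count_add_count_le (x y : Int) (hne : x ≠ y) (A : List Int) :
    A.count x + A.count y ≤ A.length := by
  induction A with
  | nil => simp
  | cons h t ih =>
    simp only [List.count_cons, List.length_cons]
    by_cases h1 : h = x <;> by_cases h2 : h = y <;> simp_all <;> omega

lemma maj_unique (A : List Int) (x y : Int) (hx : 2 * (A.count x : Int) > (A.length : Int))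
    (hy : 2 * (A.count y : Int) > (A.length : Int)) : x = y := by
  by_contra hne
  have := count_add_count_le x y hne A
  omega

lemma scan_none (n : Int) (items : List (Int × Int)) (h : ∀ p ∈ items, ¬ p.2 > PySem.Int.floordiv n 2) :
    findLeaderScan n items = -1 := by
  induction items with
  | nil => rfl
  | cons p rest ih =>
    obtain ⟨v, c⟩ := p
    unfold findLeaderScan
    rw [if_neg (h (v, c) (by simp))]
    exact ih (fun q hq => h q (by simp [hq]))

lemma scan_finds (n : Int) (m : Int) (items : List (Int × Int))
    (hmem : ∃ c, (m, c) ∈ items ∧ c > PySem.Int.floordiv n 2)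
    (huniq : ∀ p ∈ items, p.2 > PySem.Int.floordiv n 2 → p.1 = m) :
    findLeaderScan n items = m := by
  induction items with
  | nil => simp at hmem
  | cons p rest ih =>
    obtain ⟨v, c⟩ := p
    unfold findLeaderScan
    by_cases hc : c > PySem.Int.floordiv n 2
    · rw [if_pos hc]
      exact huniq (v, c) (by simp) hc
    · rw [if_neg hc]
      refine ih ?_ (fun q hq hq2 => huniq q (by simp [hq]) hq2)
      obtain ⟨c', hc', hgt⟩ := hmem
      refine ⟨c', ?_, hgt⟩
      rcases List.mem_cons.1 hc' with heq | hm
      · exfalso; exact hc (by cases heq; exact hgt)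
      · exact hm
lemma loop_eq (leader n total : Int) (ps : List (Int × Int)) :
    ∀ (left equi : Int),
    (ps.foldl (fun (s : Int × Int × Int) p =>
      (if p.2 = leader then s.1 - 1 else s.1,
       if p.2 = leader then s.2.1 + 1 else s.2.1,
       if (if p.2 = leader then s.1 - 1 else s.1) > PySem.Int.floordiv (n - (p.1 + 1)) 2 ∧
          (if p.2 = leader then s.2.1 + 1 else s.2.1) > PySem.Int.floordiv (p.1 + 1) 2
       then s.2.2 + 1 else s.2.2)) (total - left, left, equi)).2.2
    = (ps.foldl (fun (s : Int × Int) p =>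
      (if p.2 = leader then s.1 + 1 else s.1,
       if (if p.2 = leader then s.1 + 1 else s.1) > PySem.Int.floordiv (p.1 + 1) 2 ∧
          total - (if p.2 = leader then s.1 + 1 else s.1) > PySem.Int.floordiv (n - p.1 - 1) 2
       then s.2 + 1 else s.2)) (left, equi)).2 := by
  induction ps with
  | nil => intro left equi; rfl
  | cons p rest ih =>
    intro left equi
    simp only [List.foldl_cons]
    by_cases hp : p.2 = leader
    · simp only [hp, eq_self_iff_true, if_true]
      have hiff : ((total - left - 1 > PySem.Int.floordiv (n - (p.1 + 1)) 2) ∧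
            (left + 1 > PySem.Int.floordiv (p.1 + 1) 2)) ↔
          ((left + 1 > PySem.Int.floordiv (p.1 + 1) 2) ∧
            (total - (left + 1) > PySem.Int.floordiv (n - p.1 - 1) 2)) := by
        rw [show (total - left - 1 : Int) = total - (left + 1) from by ring,
          show n - (p.1 + 1) = n - p.1 - 1 from by ring, and_comm]
      rw [if_congr hiff rfl rfl]
      rw [show (total - left - 1 : Int) = total - (left + 1) from by ring]
      exact ih (left + 1) _
    · simp only [if_neg hp]
      have hiff : ((total - left > PySem.Int.floordiv (n - (p.1 + 1)) 2) ∧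
            (left > PySem.Int.floordiv (p.1 + 1) 2)) ↔
          ((left > PySem.Int.floordiv (p.1 + 1) 2) ∧
            (total - left > PySem.Int.floordiv (n - p.1 - 1) 2)) := by
        rw [show n - (p.1 + 1) = n - p.1 - 1 from by ring, and_comm]
      rw [if_congr hiff rfl rfl]
      exact ih left _
theorem main_lemma (A : List Int) : solution A = solution_alt A := by
  unfold solution solution_alt
  simp only [PySem.Dict.foldl_insert_getD_add_one_eq_counter, PySem.Dict.items_counter,
    PySem.Dict.getD_counter, PySem.List.count_eq]
  by_cases hmaj : ∃ m : Int, 2 * (List.count m A : Int) > (A.length : Int)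
  · obtain ⟨m, hm⟩ := hmaj
    have hA : findLeader A = m := findLeader_of_majority A m hm
    have hscan : findLeaderScan (A.length : Int)
        ((PySem.Set.ofList A).map (fun k => (k, (List.count k A : Int)))) = m := by
      apply scan_finds
      · refine ⟨(List.count m A : Int), List.mem_map_of_mem ?_, ?_⟩
        · rw [PySem.Set.mem_ofList]
          exact List.count_pos_iff.mp (by omega)
        · exact (gt_fdiv_iff A.length _).mpr hm
      · rintro ⟨v, c⟩ hp hgt
        obtain ⟨k, hk, hke⟩ := List.mem_map.1 hp
        have h1 : k = v := congrArg Prod.fst hke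
        have h2 : (List.count k A : Int) = c := congrArg Prod.snd hke
        subst h1; subst h2
        exact maj_unique A k m ((gt_fdiv_iff A.length _).mp hgt) hm
    rw [hA, hscan]
    by_cases hm1 : m = -1
    · rw [if_pos hm1, if_pos hm1]
    · rw [if_neg hm1, if_neg hm1]
      have h := loop_eq m (A.length : Int) (List.count m A : Int) (PySem.List.enumerate A) 0 0
      rw [sub_zero] at h
      exact h
  · push_neg at hmaj
    have hA : findLeader A = -1 :=
      findLeader_of_no_majority A (fun x => by have := hmaj x; omega)
    have hscan : findLeaderScan (A.length : Int)
        ((PySem.Set.ofList A).map (fun k => (k, (List.count k A : Int)))) = -1 := by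
      apply scan_none
      rintro ⟨v, c⟩ hp
      obtain ⟨k, hk, hke⟩ := List.mem_map.1 hp
      have h1 : k = v := congrArg Prod.fst hke
      have h2 : (List.count k A : Int) = c := congrArg Prod.snd hke
      subst h1; subst h2
      intro hgt
      have := hmaj k
      have := (gt_fdiv_iff A.length _).mp hgt
      omega
    rw [hA, hscan, if_pos rfl, if_pos rfl]

-- ===== VERDICT (by name: the statement is the Claim_ definition above) =====
theorem solution_spec : Claim_equal_solution := by
  intro A _
  unfold Spec_solution
  exact main_lemma A
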